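-- pv_equiv track=rewrite | github.com/devProdigy/scam_finder | app/finders/cards_finder.py | _is_number_found
-- ===== SOURCE A (Python) =====
-- def _is_number_found(text: str, reverse: bool = False) -> bool:
--     """Return True if number was found, False otherwise."""
--     end_of_line_chars = ("\n", "\n\r")
--     text = text[::-1] if reverse else text
--
--     for char in text:
--         if char in end_of_line_chars:
--             return False
--         if char.isdigit():
--             return True
--     return False
-- ===== SOURCE B (Python) =====
-- def _is_number_found(text: str, reverse: bool = False) -> bool:
--     """Return True if number was found, False otherwise."""
--     text = text[::-1] if reverse else text
--     line = text.split("\n", 1)[0]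
--     return any(c.isdigit() for c in line)
-- ===== Notes on version B (the rewrite author's own statement) =====
-- stated objective: simpler
-- what changed: B replaces A's single combined per-char scan (with its dead two-char tuple entry) by two plain passes: isolate the first line with split limited to one split, then test that line with any-isdigit.
import Mathlib
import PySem

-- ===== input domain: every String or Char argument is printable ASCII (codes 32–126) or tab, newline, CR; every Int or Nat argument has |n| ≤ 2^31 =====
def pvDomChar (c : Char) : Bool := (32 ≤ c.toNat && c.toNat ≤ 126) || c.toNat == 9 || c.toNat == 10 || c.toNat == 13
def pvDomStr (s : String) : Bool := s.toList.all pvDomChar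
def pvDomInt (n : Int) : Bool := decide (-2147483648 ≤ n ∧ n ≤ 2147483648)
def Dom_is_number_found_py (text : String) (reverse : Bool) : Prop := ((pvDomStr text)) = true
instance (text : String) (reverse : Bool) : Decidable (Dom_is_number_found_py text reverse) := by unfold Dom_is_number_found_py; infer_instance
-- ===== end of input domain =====

-- B isolates the first line with split("\n",1)[0] and then tests it with any(isdigit), two plain passes instead of A's combined scan (objective: simpler).

-- ===== PORT A =====
-- A's per-char loop; membership of a single char in the tuple ("\n", "\n\r") is exactly
-- equality with '\n' (the two-char entry "\n\r" can never equal a single char).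
def isNumberFoundLoopA : List Char → Bool
  | [] => false
  | c :: rest =>
      if c = '\n' then false
      else if PySem.Chars.isdigit c then true
      else isNumberFoundLoopA rest

def is_number_found_py (text : String) (reverse : Bool) : Bool :=
  let cs := if reverse then text.toList.reverse else text.toList
  isNumberFoundLoopA cs

-- ===== PORT B =====
def is_number_found_py_alt (text : String) (reverse : Bool) : Bool :=
  let cs := if reverse then text.toList.reverse else text.toList
  let line := cs.takeWhile (fun c => c ≠ '\n')   -- split("\n", 1)[0]
  line.any PySem.Chars.isdigit                   -- any(c.isdigit() for c in line)

-- ===== PRECONDITION & SPEC =====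
def Spec_is_number_found_py (text : String) (reverse : Bool) (out : Bool) : Prop := out = is_number_found_py_alt text reverse
instance (text : String) (reverse : Bool) (out : Bool) : Decidable (Spec_is_number_found_py text reverse out) := by unfold Spec_is_number_found_py; infer_instance

-- ===== CLAIM (what is proved, stated in full; the proofs are below) =====
def Claim_equal_is_number_found_py : Prop := ∀ (text : String) (reverse : Bool), Dom_is_number_found_py text reverse → Spec_is_number_found_py text reverse (is_number_found_py text reverse)

-- ===== LEMMAS AND PROOFS =====
theorem loopA_eq_any (cs : List Char) :
    isNumberFoundLoopA cs = (cs.takeWhile (fun c => c ≠ '\n')).any PySem.Chars.isdigit := by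
  induction cs with
  | nil => rfl
  | cons c rest ih =>
      by_cases h : c = '\n'
      · simp [isNumberFoundLoopA, List.takeWhile, h]
      · by_cases hd : PySem.Chars.isdigit c = true <;>
          simp [isNumberFoundLoopA, List.takeWhile, h, hd, ih]

-- ===== VERDICT (by name: the statement is the Claim_ definition above) =====
theorem is_number_found_py_spec : Claim_equal_is_number_found_py := by
  intro text reverse _
  unfold Spec_is_number_found_py is_number_found_py is_number_found_py_alt
  simp only [loopA_eq_any]
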